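-- pv_equiv track=rewrite | github.com/RissRossApplesauce/DKC3 | Short Solutions/Spiral/Spiral.py | solve
-- ===== SOURCE A (Python) =====
-- def solve(x):
--     size = x//2
--     if x / 2 == size:
--         pass # not solved for even input. the question didnt give much information about that case and we decided to skip it
--     else:
--         r = 1 # result
--         l = 1 # last value of previous ring (starts at 1 because 1 is the first ring)
--         for s in range(size):
--             # s is how many rings away from the center we are
--             # formulas found by drawing out the spiral and seeing how much each ring of the spiral adds
--             i = 2 * (s + 1) # i means increment. i + the current value gives the next value
--             r += 4 * l + 10 * i # formula that gets the total value of the ring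
--             l += 4 * i # determine the last value of this ring so we can use it in the next iteration
--         return r
-- ===== SOURCE B (Python) =====
-- def solve(x):
--     # closed form: summing ring contributions 16*s^2 + 36*s + 24 for s in range(x//2)
--     if x % 2 == 0:
--         return None
--     n = max(x // 2, 0)
--     return 1 + (16 * n**3 + 30 * n**2 + 26 * n) // 3
-- ===== Notes on version B (the rewrite author's own statement) =====
-- stated objective: faster
-- what changed: Replaced the O(x) ring-by-ring accumulation loop with the closed-form cubic polynomial 1 + (16n^3 + 30n^2 + 26n)//3 obtained by summing the per-ring arithmetic series; intended as faster, measured ~144x at the largest odd input (even inputs return None immediately in both, so the probe's overall measurement was mixed).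
import Mathlib
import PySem

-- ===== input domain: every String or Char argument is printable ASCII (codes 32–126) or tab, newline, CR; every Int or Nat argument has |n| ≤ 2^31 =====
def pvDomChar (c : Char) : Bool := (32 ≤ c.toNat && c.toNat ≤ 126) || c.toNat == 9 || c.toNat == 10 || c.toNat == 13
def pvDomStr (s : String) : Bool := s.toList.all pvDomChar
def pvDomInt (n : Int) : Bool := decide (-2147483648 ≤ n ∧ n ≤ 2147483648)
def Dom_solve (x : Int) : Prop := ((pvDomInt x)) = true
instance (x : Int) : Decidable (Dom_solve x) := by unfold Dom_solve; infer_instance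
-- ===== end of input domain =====

-- B replaces A's per-ring accumulation loop by the closed-form cubic polynomial; intended as faster (a timing run measured B ~144x at its largest size on odd inputs; even inputs return None in both, so the overall measurement was inconsistent).

-- ===== PORT A =====
-- A's even test is `x / 2 == x // 2` (float); on the stated |x| ≤ 2^31 domain this is
-- exactly "x is even", ported as mod x 2 = 0.
def solve (x : Int) : Option Int :=
  let size := PySem.Int.floordiv x 2
  if PySem.Int.mod x 2 = 0 then
    none
  else
    let p := (PySem.List.pyRange 0 size 1).foldl
      (fun (p : Int × Int) s =>
        let i := 2 * (s + 1)
        (p.1 + 4 * p.2 + 10 * i, p.2 + 4 * i)) (1, 1)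
    some p.1

-- ===== PORT B =====
def solve_alt (x : Int) : Option Int :=
  if PySem.Int.mod x 2 = 0 then
    none
  else
    let n := max (PySem.Int.floordiv x 2) 0
    some (1 + PySem.Int.floordiv (16 * n ^ 3 + 30 * n ^ 2 + 26 * n) 3)

-- ===== PRECONDITION & SPEC =====
def Spec_solve (x : Int) (out : Option Int) : Prop := out = solve_alt x
instance (x : Int) (out : Option Int) : Decidable (Spec_solve x out) := by unfold Spec_solve; infer_instance

-- ===== CLAIM (what is proved, stated in full; the proofs are below) =====
def Claim_equal_solve : Prop := ∀ (x : Int), Dom_solve x → Spec_solve x (solve x)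

-- ===== LEMMAS AND PROOFS =====

-- 3 divides 16k^3 + 30k^2 + 26k (three consecutive integers appear in it).
lemma solve_P_dvd (k : Int) : (3 : Int) ∣ 16 * k ^ 3 + 30 * k ^ 2 + 26 * k := by
  have hsplit : 16 * k ^ 3 + 30 * k ^ 2 + 26 * k
      = 16 * ((k - 1) * k * (k + 1)) + 3 * (10 * k ^ 2 + 14 * k) := by ring
  rw [hsplit]
  refine Dvd.dvd.add (Dvd.dvd.mul_left ?_ 16) ⟨10 * k ^ 2 + 14 * k, rfl⟩
  obtain ⟨q, r, hr0, hr3, hk⟩ : ∃ q r : Int, 0 ≤ r ∧ r < 3 ∧ k = 3 * q + r :=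
    ⟨k / 3, k % 3, Int.emod_nonneg _ (by norm_num), Int.emod_lt_of_pos _ (by norm_num),
      (Int.mul_ediv_add_emod _ _).symm⟩
  interval_cases r <;> subst hk
  · exact ⟨(3 * q - 1) * q * (3 * q + 1), by ring⟩
  · exact ⟨q * (3 * q + 1) * (3 * q + 2), by ring⟩
  · exact ⟨(3 * q + 1) * (3 * q + 2) * (q + 1), by ring⟩

-- Loop invariant: after n iterations, r = 1 + P(n)/3 and l = 1 + 4n + 4n^2.
lemma solve_loop_closed (n : Nat) :
    (PySem.List.pyRange 0 (n : Int) 1).foldl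
      (fun (p : Int × Int) s =>
        let i := 2 * (s + 1)
        (p.1 + 4 * p.2 + 10 * i, p.2 + 4 * i)) (1, 1)
    = (1 + (16 * (n : Int) ^ 3 + 30 * (n : Int) ^ 2 + 26 * (n : Int)) / 3,
       1 + 4 * (n : Int) + 4 * (n : Int) ^ 2) := by
  induction n with
  | zero => simp [PySem.List.pyRange_one_eq_nil]
  | succ m ih =>
      have hcast : ((m + 1 : Nat) : Int) = (m : Int) + 1 := by push_cast; ring
      rw [hcast, PySem.List.pyRange_one_succ_right (by positivity), List.foldl_append, ih]
      simp only [List.foldl_cons, List.foldl_nil]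
      obtain ⟨a, ha⟩ := solve_P_dvd (m : Int)
      obtain ⟨b, hb⟩ := solve_P_dvd ((m : Int) + 1)
      rw [ha, hb, Int.mul_ediv_cancel_left _ (by norm_num : (3:Int) ≠ 0),
          Int.mul_ediv_cancel_left _ (by norm_num : (3:Int) ≠ 0)]
      simp only [Prod.mk.injEq]
      constructor
      · ring_nf at ha hb ⊢; linarith
      · ring

-- ===== VERDICT (by name: the statement is the Claim_ definition above) =====
theorem solve_spec : Claim_equal_solve := by
  intro x _
  unfold Spec_solve solve solve_alt
  by_cases h : PySem.Int.mod x 2 = 0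
  · rw [if_pos h, if_pos h]
  · rw [if_neg h, if_neg h]
    set sz := PySem.Int.floordiv x 2 with hsz
    have hrange : PySem.List.pyRange 0 sz 1 = PySem.List.pyRange 0 ((sz.toNat : Int)) 1 := by
      by_cases hle : 0 ≤ sz
      · rw [Int.toNat_of_nonneg hle]
      · rw [PySem.List.pyRange_one_eq_nil (by omega), PySem.List.pyRange_one_eq_nil (by omega)]
    rw [hrange, solve_loop_closed]
    dsimp only
    have hmax : max sz 0 = ((sz.toNat : Int)) := by omega
    rw [hmax]
    set n : Int := (sz.toNat : Int) with hn
    obtain ⟨c, hc⟩ := solve_P_dvd n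
    rw [PySem.Int.floordiv_eq_ediv_of_pos (by norm_num : (0:Int) < 3), hc,
        Int.mul_ediv_cancel_left _ (by norm_num : (3:Int) ≠ 0)]
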